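-- pv_equiv track=rewrite | github.com/Taj244/IoT4SPACE-master | lsx_write_auto.py | extract_hour
-- ===== SOURCE A (Python) =====
-- def extract_hour(date):
--     temp = ""
--     results = ""
--     for letter in date:
--         if letter == '-':
--             temp += '/'
--         elif letter == 'T':
--             temp = ""
--         elif letter == '.':
--             results = temp
--         else:
--             temp += letter
--     # print (results)
--     return results
-- ===== SOURCE B (Python) =====
-- def extract_hour(date):
--     # Backward delimiter search instead of A's forward char-by-char state machine:
--     # take the part before the last '.', keep what's after its last 'T',
--     # then drop stray '.' and map '-' to '/'.
--     head, sep, _tail = date.rpartition('.')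
--     if not sep:
--         return ""
--     head = head.rpartition('T')[2]
--     return head.replace('.', '').replace('-', '/')
-- ===== Notes on version B (the rewrite author's own statement) =====
-- stated objective: simpler
-- what changed: Replaced A's forward char-by-char accumulator/state-machine with two backward delimiter searches (rpartition at the last dot and the last T) plus a final dot-removal and dash-to-slash replacement done by str.replace.
import Mathlib
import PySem

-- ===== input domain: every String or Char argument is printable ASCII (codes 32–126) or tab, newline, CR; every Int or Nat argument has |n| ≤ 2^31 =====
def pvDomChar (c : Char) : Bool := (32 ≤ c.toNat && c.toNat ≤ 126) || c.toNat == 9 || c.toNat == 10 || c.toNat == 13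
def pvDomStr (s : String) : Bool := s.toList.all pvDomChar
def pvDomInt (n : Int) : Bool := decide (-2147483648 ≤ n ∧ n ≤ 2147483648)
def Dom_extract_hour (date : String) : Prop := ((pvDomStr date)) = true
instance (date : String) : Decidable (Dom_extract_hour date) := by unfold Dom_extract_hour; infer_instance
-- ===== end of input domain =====

-- B replaces A's forward accumulator state-machine by backward delimiter searches
-- (rpartition) plus a cleanup pass; objective: simpler. Proven equal on all strings.

-- ===== PORT A =====
-- state = (temp, results), strings kept as char lists
def pvStepA (s : List Char × List Char) (letter : Char) : List Char × List Char :=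
  if letter = '-' then (s.1 ++ ['/'], s.2)
  else if letter = 'T' then ([], s.2)
  else if letter = '.' then (s.1, s.1)
  else (s.1 ++ [letter], s.2)

def extract_hour (date : String) : String :=
  String.mk (date.toList.foldl pvStepA ([], [])).2

-- ===== PORT B =====
-- hand port of str.rpartition with a single-char separator (exact there):
-- returns (before-last-occurrence, found?, after-last-occurrence); if not found,
-- Python gives ('', '', s), i.e. (found = false, after = whole string).
def pvRPart (sep : Char) : List Char → List Char × Bool × List Char
  | [] => ([], false, [])
  | x :: xs =>
    if sep ∈ xs then
      let r := pvRPart sep xs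
      (x :: r.1, true, r.2.2)
    else if x = sep then ([], true, xs)
    else ([], false, x :: xs)

def pvSub (c : Char) : Char := if c = '-' then '/' else c

-- head.replace('.','').replace('-','/') for single-char patterns (exact there)
def pvClean (cs : List Char) : List Char := (cs.filter (fun c => c ≠ '.')).map pvSub

def extract_hour_alt (date : String) : String :=
  let p := pvRPart '.' date.toList
  if p.2.1 = false then ""
  else String.mk (pvClean ((pvRPart 'T' p.1).2.2))

-- ===== PRECONDITION & SPEC =====
def Spec_extract_hour (date : String) (out : String) : Prop := out = extract_hour_alt date
instance (date : String) (out : String) : Decidable (Spec_extract_hour date out) := by unfold Spec_extract_hour; infer_instance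

-- ===== CLAIM (what is proved, stated in full; the proofs are below) =====
def Claim_equal_extract_hour : Prop := ∀ (date : String), Dom_extract_hour date → Spec_extract_hour date (extract_hour date)

-- ===== LEMMAS AND PROOFS =====

theorem pvRPart_cons (sep x : Char) (xs : List Char) :
    pvRPart sep (x :: xs) =
      if sep ∈ xs then (x :: (pvRPart sep xs).1, true, (pvRPart sep xs).2.2)
      else if x = sep then ([], true, xs)
      else ([], false, x :: xs) := by
  simp [pvRPart]

theorem pvRPart_found (sep : Char) (cs : List Char) :
    (pvRPart sep cs).2.1 = true ↔ sep ∈ cs := by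
  induction cs with
  | nil => simp [pvRPart]
  | cons x xs ih =>
    rw [pvRPart_cons]
    by_cases h : sep ∈ xs
    · simp [h]
    · by_cases hx : x = sep
      · simp [h, hx]
      · simp [h, hx]
        exact fun e => hx (Eq.symm e)

theorem pvRPart_after_not_mem (sep : Char) (cs : List Char) (h : sep ∉ cs) :
    (pvRPart sep cs).2.2 = cs := by
  cases cs with
  | nil => simp [pvRPart]
  | cons x xs =>
    rw [pvRPart_cons]
    simp at h
    have hx : x ≠ sep := fun e => h.1 (Eq.symm e)
    simp [h.2, hx]

theorem pvFold_results (cs : List Char) (t r : List Char) :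
    (cs.foldl pvStepA (t, r)).2 =
      if '.' ∈ cs then
        (if 'T' ∈ (pvRPart '.' cs).1 then pvClean ((pvRPart 'T' (pvRPart '.' cs).1).2.2)
         else t ++ pvClean (pvRPart '.' cs).1)
      else r := by
  induction cs generalizing t r with
  | nil => simp
  | cons c cs ih =>
    simp only [List.foldl_cons]
    by_cases hdot : c = '.'
    · subst hdot
      simp only [pvStepA, if_neg (by decide : ('.' : Char) ≠ '-'),
        if_neg (by decide : ('.' : Char) ≠ 'T')]
      rw [ih]
      by_cases h : '.' ∈ cs
      · rw [pvRPart_cons]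
        simp only [h, if_pos, List.mem_cons, true_or]
        have hT : ('T' ∈ '.' :: (pvRPart '.' cs).1) ↔ 'T' ∈ (pvRPart '.' cs).1 := by simp
        by_cases hTh : 'T' ∈ (pvRPart '.' cs).1
        · rw [pvRPart_cons 'T' '.' _]
          simp [hTh, pvClean]
        · simp [hTh, pvClean]
      · rw [pvRPart_cons]
        simp [h, pvClean]
    · by_cases hT : c = 'T'
      · subst hT
        simp only [pvStepA, if_neg (by decide : ('T' : Char) ≠ '-')]
        rw [ih]
        by_cases h : '.' ∈ cs
        · rw [pvRPart_cons]
          simp only [h, if_pos, List.mem_cons, or_true]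
          rw [pvRPart_cons 'T' 'T' _]
          by_cases hTh : 'T' ∈ (pvRPart '.' cs).1
          · simp [hTh]
          · simp [hTh]
        · simp [h]
      · by_cases hdash : c = '-'
        · subst hdash
          simp only [pvStepA]
          rw [ih]
          by_cases h : '.' ∈ cs
          · rw [pvRPart_cons]
            simp only [h, if_pos, List.mem_cons, or_true]
            by_cases hTh : 'T' ∈ (pvRPart '.' cs).1
            · rw [pvRPart_cons 'T' '-' _]
              simp [hTh]
            · simp [hTh, pvClean, pvSub]
          · rw [pvRPart_cons]
            simp [h]
        · -- ordinary character
          simp only [pvStepA, if_neg hdash, if_neg hT, if_neg hdot]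
          rw [ih]
          by_cases h : '.' ∈ cs
          · rw [pvRPart_cons]
            simp only [h, if_pos, List.mem_cons, or_true]
            by_cases hTh : 'T' ∈ (pvRPart '.' cs).1
            · rw [pvRPart_cons 'T' c _]
              simp [hTh]
            · have hT' : ¬('T' = c) := fun e => hT (Eq.symm e)
              simp [hTh, hT', pvClean, pvSub, hdash, hdot]
          · rw [pvRPart_cons]
            have hdot' : ¬('.' = c) := fun e => hdot (Eq.symm e)
            simp [h, hdot']

-- ===== VERDICT (by name: the statement is the Claim_ definition above) =====
theorem extract_hour_spec : Claim_equal_extract_hour := by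
  intro date _
  unfold Spec_extract_hour extract_hour extract_hour_alt
  rw [pvFold_results]
  by_cases h : '.' ∈ date.toList
  · have hf : (pvRPart '.' date.toList).2.1 = true := (pvRPart_found _ _).mpr h
    simp only [h, if_true, hf, Bool.true_eq_false, if_false]
    by_cases hTh : 'T' ∈ (pvRPart '.' date.toList).1
    · simp [hTh]
    · simp [hTh, pvRPart_after_not_mem 'T' _ hTh]
  · have hf : (pvRPart '.' date.toList).2.1 = false := by
      cases hb : (pvRPart '.' date.toList).2.1
      · rfl
      · exact absurd ((pvRPart_found _ _).mp hb) h
    simp only [h, if_false, hf]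
    rfl
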